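-- pv_equiv track=rewrite | github.com/DeepaShrinidhiPandurangi/Problem_Solving | Codewars/Longest_vowel_chain.py | solve
-- ===== SOURCE A (Python) =====
-- def solve(s):
--   L=[]
--   st=""
--   for i in range(0,len(s)):
--     if s[i] in ["a","e","i","o","u"]:
--       st=st + s[i]
--       L.append(st)
--     else:
--       st=""
--   return(len(max(L,key=len)))
--   pass
-- ===== SOURCE B (Python) =====
-- def solve(s):
--     best = 0
--     cur = 0
--     for c in s:
--         if c in "aeiou":
--             cur += 1
--             if cur > best:
--                 best = cur
--         else:
--             cur = 0
--     return best
-- ===== Notes on version B (the rewrite author's own statement) =====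
-- stated objective: simpler
-- what changed: replaces building every prefix string of each vowel run plus a max-by-len scan with a single pass tracking current and maximal run length
-- crash fix: On strings with no vowel (including the empty string) A raises ValueError from max([]); B returns 0. — e.g. on solve("xyz"): A raises ValueError, B returns 0
import Mathlib
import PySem

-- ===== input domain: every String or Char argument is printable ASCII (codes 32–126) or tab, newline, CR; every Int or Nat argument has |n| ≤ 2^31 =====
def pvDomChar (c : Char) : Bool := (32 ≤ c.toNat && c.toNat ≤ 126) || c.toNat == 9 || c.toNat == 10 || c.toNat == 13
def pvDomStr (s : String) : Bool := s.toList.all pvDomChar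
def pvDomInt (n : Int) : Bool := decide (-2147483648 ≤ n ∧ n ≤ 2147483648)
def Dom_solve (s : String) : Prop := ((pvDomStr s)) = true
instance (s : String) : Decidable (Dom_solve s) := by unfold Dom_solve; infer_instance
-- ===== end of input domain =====

-- B replaces A's prefix-list + max-by-len approach with a single pass over the
-- characters tracking current and maximal vowel-run length (simpler, one pass).


-- ===== PORT A =====
-- str values are carried as List Char (PySem.Chars); the loop `for i in
-- range(0, len(s))` with `s[i]` is rendered as a fold over s.toList (exact:
-- every index is in range).  `max(L, key=len)` is PySem.List.max? with key len;
-- on empty L Python raises ValueError (excluded by Pre_solve; the port's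
-- `none` branch is unreachable there).
def solveStepA (p : List (List Char) × List Char) (c : Char) :
    List (List Char) × List Char :=
  if c ∈ ['a', 'e', 'i', 'o', 'u'] then
    let st' := p.2 ++ [c]
    (p.1 ++ [st'], st')
  else (p.1, [])

def solve (s : String) : Int :=
  let r := s.toList.foldl solveStepA ([], [])
  match PySem.List.max? r.1 (fun t => (t.length : Int)) with
  | some m => (m.length : Int)
  | none => 0

-- ===== PORT B =====
-- single pass: state (best, cur); `c in "aeiou"` is membership of the char.
def solveStepB (p : Int × Int) (c : Char) : Int × Int :=
  if c ∈ ['a', 'e', 'i', 'o', 'u'] then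
    let cur := p.2 + 1
    (if cur > p.1 then cur else p.1, cur)
  else (p.1, 0)

def solve_alt (s : String) : Int :=
  (s.toList.foldl solveStepB (0, 0)).1

-- ===== PRECONDITION & SPEC =====
-- A raises ValueError (max of an empty list) when s contains no vowel; Pre_ admits
-- exactly the strings containing at least one vowel.
def Pre_solve (s : String) : Prop :=
  (s.toList.any (fun c => c ∈ ['a', 'e', 'i', 'o', 'u'])) = true
instance (s : String) : Decidable (Pre_solve s) := by unfold Pre_solve; infer_instance
def pvWitness_solve : String := "hello"

-- On strings with no vowel (including "") A raises ValueError from max([]); B returns 0.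
def Raises_solve (s : String) : Prop :=
  (s.toList.all (fun c => c ∉ ['a', 'e', 'i', 'o', 'u'])) = true
instance (s : String) : Decidable (Raises_solve s) := by unfold Raises_solve; infer_instance
def pvRaiseWitness_solve : String := "xyz"
def pvRaiseWitnessOut_solve : Int := 0

def Spec_solve (s : String) (out : Int) : Prop := out = solve_alt s
instance (s : String) (out : Int) : Decidable (Spec_solve s out) := by unfold Spec_solve; infer_instance

-- ===== CLAIM (what is proved, stated in full; the proofs are below) =====
def Claim_equal_solve : Prop := ∀ (s : String), Dom_solve s → Pre_solve s → Spec_solve s (solve s)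
def Claim_raises_solve : Prop :=
  (∀ (s : String), Dom_solve s → Raises_solve s → ¬ Pre_solve s) ∧
  (Dom_solve (pvRaiseWitness_solve) ∧ Raises_solve (pvRaiseWitness_solve) ∧
    solve_alt (pvRaiseWitness_solve) = pvRaiseWitnessOut_solve)

-- ===== LEMMAS AND PROOFS =====

def pvMaxLen (L : List (List Char)) : Int :=
  L.foldl (fun b t => max b ((t.length : Int))) 0

lemma pvMaxLen_le_foldl (L : List (List Char)) (a : Int) :
    a ≤ L.foldl (fun b t => max b ((t.length : Int))) a := by
  induction L generalizing a with
  | nil => simp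
  | cons x xs ih =>
      simp only [List.foldl_cons]
      exact le_trans (le_max_left _ _) (ih _)

lemma pvMem_le_foldl (L : List (List Char)) (a : Int) (y : List Char) (hy : y ∈ L) :
    (y.length : Int) ≤ L.foldl (fun b t => max b ((t.length : Int))) a := by
  induction L generalizing a with
  | nil => cases hy
  | cons x xs ih =>
      simp only [List.foldl_cons]
      rcases List.mem_cons.mp hy with hy | hy
      · subst hy
        exact le_trans (le_max_right _ _) (pvMaxLen_le_foldl _ _)
      · exact ih _ hy

lemma pvFoldl_le (L : List (List Char)) (a c : Int) (ha : a ≤ c)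
    (h : ∀ y ∈ L, (y.length : Int) ≤ c) :
    L.foldl (fun b t => max b ((t.length : Int))) a ≤ c := by
  induction L generalizing a with
  | nil => simpa using ha
  | cons x xs ih =>
      simp only [List.foldl_cons]
      exact ih _ (max_le ha (h x List.mem_cons_self)) (fun y hy => h y (List.mem_cons_of_mem _ hy))

-- B's fold: best is nondecreasing and the state stays nonnegative
lemma pvB_snd_nonneg (cs : List Char) (p : Int × Int) (h : 0 ≤ p.2) :
    0 ≤ (cs.foldl solveStepB p).2 := by
  induction cs generalizing p with
  | nil => simpa using h
  | cons c cs ih =>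
      simp only [List.foldl_cons]
      refine ih _ ?_
      by_cases hv : c ∈ ['a', 'e', 'i', 'o', 'u'] <;> simp [solveStepB, hv] <;> omega

lemma pvB_mono (cs : List Char) (p : Int × Int) : p.1 ≤ (cs.foldl solveStepB p).1 := by
  induction cs generalizing p with
  | nil => simp
  | cons c cs ih =>
      simp only [List.foldl_cons]
      refine le_trans ?_ (ih _)
      by_cases hv : c ∈ ['a', 'e', 'i', 'o', 'u'] <;> simp [solveStepB, hv]
      · split <;> omega

lemma pvB_pos (l1 : List Char) (c : Char) (l2 : List Char)
    (hv : c ∈ ['a', 'e', 'i', 'o', 'u']) :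
    1 ≤ ((l1 ++ c :: l2).foldl solveStepB (0, 0)).1 := by
  rw [List.foldl_append, List.foldl_cons]
  have h2 : 0 ≤ (l1.foldl solveStepB (0, 0)).2 := pvB_snd_nonneg l1 _ le_rfl
  refine le_trans ?_ (pvB_mono l2 _)
  simp only [solveStepB, hv, if_pos]
  split <;> omega

-- main loop invariant relating the two folds
lemma pvLoop (cs : List Char) (L : List (List Char)) (st : List Char) (best cur : Int)
    (h1 : (st.length : Int) = cur) (h2 : pvMaxLen L = best) :
    ((cs.foldl solveStepA (L, st)).2.length : Int) = (cs.foldl solveStepB (best, cur)).2 ∧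
      pvMaxLen (cs.foldl solveStepA (L, st)).1 = (cs.foldl solveStepB (best, cur)).1 := by
  induction cs generalizing L st best cur with
  | nil => exact ⟨h1, h2⟩
  | cons c cs ih =>
      simp only [List.foldl_cons]
      by_cases hv : c ∈ ['a', 'e', 'i', 'o', 'u']
      · have hA : solveStepA (L, st) c = (L ++ [st ++ [c]], st ++ [c]) := by
          simp [solveStepA, hv]
        have hB : solveStepB (best, cur) c
            = (if cur + 1 > best then cur + 1 else best, cur + 1) := by
          simp [solveStepB, hv]
        rw [hA, hB]
        have h1' : ((st ++ [c]).length : Int) = cur + 1 := by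
          simp [List.length_append]; omega
        have h2' : pvMaxLen (L ++ [st ++ [c]]) = (if cur + 1 > best then cur + 1 else best) := by
          simp only [pvMaxLen, List.foldl_append, List.foldl_cons, List.foldl_nil] at h2 ⊢
          rw [h2, h1']
          rcases max_choice best (cur + 1) with h | h <;> rw [h] <;> split <;> omega
        exact ih _ _ _ _ h1' h2'
      · have hA : solveStepA (L, st) c = (L, []) := by simp [solveStepA, hv]
        have hB : solveStepB (best, cur) c = (best, 0) := by simp [solveStepB, hv]
        rw [hA, hB]
        exact ih L [] best 0 (by simp) h2

lemma pvMaxLen_eq (L : List (List Char)) (m : List Char) (hm : m ∈ L)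
    (hmax : ∀ y ∈ L, (y.length : Int) ≤ (m.length : Int)) :
    pvMaxLen L = (m.length : Int) :=
  le_antisymm (pvFoldl_le L 0 _ (by positivity) hmax) (pvMem_le_foldl L 0 m hm)

lemma pvNoVowel_not_pre (s : String) (_ : Dom_solve s) (hr : Raises_solve s) :
    ¬ Pre_solve s := by
  intro hp
  unfold Raises_solve at hr
  unfold Pre_solve at hp
  rw [List.all_eq_true] at hr
  rw [List.any_eq_true] at hp
  obtain ⟨c, hc, hcv⟩ := hp
  have := hr c hc
  simp_all

-- ===== VERDICT (by name: the statement is the Claim_ definition above) =====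
theorem solve_spec : Claim_equal_solve := by
  intro s _ hpre
  unfold Spec_solve solve solve_alt
  obtain ⟨h1, h2⟩ := pvLoop s.toList [] [] 0 0 (by simp) (by simp [pvMaxLen])
  have hL : (s.toList.foldl solveStepA ([], [])).1 ≠ [] := by
    intro h0
    rw [h0] at h2
    unfold Pre_solve at hpre
    rw [List.any_eq_true] at hpre
    obtain ⟨c, hc, hcv⟩ := hpre
    obtain ⟨l1, l2, hsplit⟩ := List.mem_iff_append.mp hc
    have hpos := pvB_pos l1 c l2 (by simpa using hcv)
    rw [← hsplit] at hpos
    simp [pvMaxLen] at h2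
    omega
  rcases h : PySem.List.max? (s.toList.foldl solveStepA ([], [])).1
      (fun t => (t.length : Int)) with _ | m
  · exact absurd ((PySem.List.max?_eq_none_iff _ _).mp h) hL
  · simp only [h]
    rw [← h2, pvMaxLen_eq _ m (PySem.List.max?_mem h) (PySem.List.max?_isMax h)]

@[simp] theorem solve_raises : Claim_raises_solve := by
  unfold Claim_raises_solve
  exact ⟨pvNoVowel_not_pre, by decide⟩
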